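-- pv_equiv track=rewrite | github.com/panpp-git/TFMD-Net | stage1/data/fr_corr.py | bresenham_line_clipped
-- ===== SOURCE A (Python) =====
-- def bresenham_line_clipped(x0, y0, x1, y1, sig_dim):
--     """标准 Bresenham，频率越界的点直接丢弃（不 wrap）"""
--     points = []
--     dx = abs(x1 - x0)
--     dy = -abs(y1 - y0)
--     sx = 1 if x0 < x1 else -1
--     sy = 1 if y0 < y1 else -1
--     err = dx + dy
--     while True:
--         if 0 <= y0 < sig_dim:
--             points.append((x0, y0))
--         if x0 == x1 and y0 == y1:
--             break
--         e2 = 2 * err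
--         if e2 >= dy:
--             err += dy
--             x0 += sx
--         if e2 <= dx:
--             err += dx
--             y0 += sy
--     return points
-- ===== SOURCE B (Python) =====
-- def bresenham_line_clipped(x0, y0, x1, y1, sig_dim):
--     """Major-axis Bresenham: two fixed-count for-loops with a single error test."""
--     adx, ady = abs(x1 - x0), abs(y1 - y0)
--     sx = 1 if x0 < x1 else -1
--     sy = 1 if y0 < y1 else -1
--     pts = []
--     x, y = x0, y0
--     if adx >= ady:
--         e = 2 * ady - adx
--         for _ in range(adx + 1):
--             if 0 <= y < sig_dim:
--                 pts.append((x, y))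
--             if e >= 0:
--                 y += sy
--                 e -= 2 * adx
--             e += 2 * ady
--             x += sx
--     else:
--         e = 2 * adx - ady
--         for _ in range(ady + 1):
--             if 0 <= y < sig_dim:
--                 pts.append((x, y))
--             if e >= 0:
--                 x += sx
--                 e -= 2 * ady
--             e += 2 * adx
--             y += sy
--     return pts
-- ===== Notes on version B (the rewrite author's own statement) =====
-- stated objective: alternative
-- what changed: Replaced A's sentinel while-True loop (break test plus two independent error conditions per iteration) by two fixed-count major-axis for-loops (max(|dx|,|dy|)+1 iterations) driven by a single decision-variable test per iteration.
import Mathlib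
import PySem

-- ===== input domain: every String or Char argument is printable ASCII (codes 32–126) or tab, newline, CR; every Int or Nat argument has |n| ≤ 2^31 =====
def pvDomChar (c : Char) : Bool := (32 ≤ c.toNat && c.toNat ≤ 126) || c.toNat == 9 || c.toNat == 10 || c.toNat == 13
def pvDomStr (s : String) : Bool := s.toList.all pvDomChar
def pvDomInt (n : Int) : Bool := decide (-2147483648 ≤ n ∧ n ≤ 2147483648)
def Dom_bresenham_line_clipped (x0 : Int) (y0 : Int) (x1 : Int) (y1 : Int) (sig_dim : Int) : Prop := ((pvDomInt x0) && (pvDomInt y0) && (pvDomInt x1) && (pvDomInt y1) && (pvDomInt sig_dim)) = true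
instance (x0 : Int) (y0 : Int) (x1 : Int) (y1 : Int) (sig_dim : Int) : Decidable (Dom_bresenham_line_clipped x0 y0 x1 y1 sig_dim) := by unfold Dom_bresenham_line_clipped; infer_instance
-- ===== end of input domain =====

-- B replaces A's sentinel while-loop (break test + two error conditions per step) by two
-- fixed-iteration-count major-axis for-loops with a single error test (objective: alternative).

-- ===== PORT A =====
-- A's `while True` loop, step for step (the two sequential `if`s flattened into their four
-- outcomes); `points.append` becomes consing onto an accumulator that is reversed on exit
-- (tail recursion); fuel is an upper bound on the iteration count, the loop stops at the
-- `break` exactly as the Python does.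
def aLoop (sig_dim x1 y1 dx dy sx sy : Int) : Nat → Int → Int → Int → List (Int × Int) → List (Int × Int)
  | 0, _, _, _, acc => acc.reverse
  | fuel+1, x0, y0, err, acc =>
    let acc1 := if 0 ≤ y0 ∧ y0 < sig_dim then (x0, y0) :: acc else acc
    if x0 = x1 ∧ y0 = y1 then acc1.reverse
    else
      if 2 * err ≥ dy then
        (if 2 * err ≤ dx then aLoop sig_dim x1 y1 dx dy sx sy fuel (x0 + sx) (y0 + sy) (err + dy + dx) acc1
         else aLoop sig_dim x1 y1 dx dy sx sy fuel (x0 + sx) y0 (err + dy) acc1)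
      else
        (if 2 * err ≤ dx then aLoop sig_dim x1 y1 dx dy sx sy fuel x0 (y0 + sy) (err + dx) acc1
         else aLoop sig_dim x1 y1 dx dy sx sy fuel x0 y0 err acc1)

def bresenham_line_clipped (x0 : Int) (y0 : Int) (x1 : Int) (y1 : Int) (sig_dim : Int) : List (Int × Int) :=
  let dx := |x1 - x0|
  let dy := -|y1 - y0|
  let sx : Int := if x0 < x1 then 1 else -1
  let sy : Int := if y0 < y1 then 1 else -1
  aLoop sig_dim x1 y1 dx dy sx sy ((dx - dy).toNat + 1) x0 y0 (dx + dy) []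

-- ===== PORT B =====
-- x-major loop of Source B: fixed adx+1 iterations, one error test per iteration
-- (`pts.append` again as cons + final reverse, tail recursive).
def bLoopX (sig_dim sx sy adx ady : Int) : Nat → Int → Int → Int → List (Int × Int) → List (Int × Int)
  | 0, _, _, _, acc => acc.reverse
  | n+1, x, y, e, acc =>
    let acc1 := if 0 ≤ y ∧ y < sig_dim then (x, y) :: acc else acc
    if e ≥ 0 then bLoopX sig_dim sx sy adx ady n (x + sx) (y + sy) (e - 2 * adx + 2 * ady) acc1
    else bLoopX sig_dim sx sy adx ady n (x + sx) y (e + 2 * ady) acc1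

-- y-major loop of Source B: fixed ady+1 iterations, one error test per iteration.
def bLoopY (sig_dim sx sy adx ady : Int) : Nat → Int → Int → Int → List (Int × Int) → List (Int × Int)
  | 0, _, _, _, acc => acc.reverse
  | n+1, x, y, e, acc =>
    let acc1 := if 0 ≤ y ∧ y < sig_dim then (x, y) :: acc else acc
    if e ≥ 0 then bLoopY sig_dim sx sy adx ady n (x + sx) (y + sy) (e - 2 * ady + 2 * adx) acc1
    else bLoopY sig_dim sx sy adx ady n x (y + sy) (e + 2 * adx) acc1

def bresenham_line_clipped_alt (x0 : Int) (y0 : Int) (x1 : Int) (y1 : Int) (sig_dim : Int) : List (Int × Int) :=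
  let adx := |x1 - x0|
  let ady := |y1 - y0|
  let sx : Int := if x0 < x1 then 1 else -1
  let sy : Int := if y0 < y1 then 1 else -1
  if adx ≥ ady then
    bLoopX sig_dim sx sy adx ady (adx.toNat + 1) x0 y0 (2 * ady - adx) []
  else
    bLoopY sig_dim sx sy adx ady (ady.toNat + 1) x0 y0 (2 * adx - ady) []

-- ===== PRECONDITION & SPEC =====
def Spec_bresenham_line_clipped (x0 : Int) (y0 : Int) (x1 : Int) (y1 : Int) (sig_dim : Int) (out : List (Int × Int)) : Prop := out = bresenham_line_clipped_alt x0 y0 x1 y1 sig_dim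
instance (x0 : Int) (y0 : Int) (x1 : Int) (y1 : Int) (sig_dim : Int) (out : List (Int × Int)) : Decidable (Spec_bresenham_line_clipped x0 y0 x1 y1 sig_dim out) := by unfold Spec_bresenham_line_clipped; infer_instance

-- ===== CLAIM (what is proved, stated in full; the proofs are below) =====
def Claim_equal_bresenham_line_clipped : Prop := ∀ (x0 : Int) (y0 : Int) (x1 : Int) (y1 : Int) (sig_dim : Int), Dom_bresenham_line_clipped x0 y0 x1 y1 sig_dim → Spec_bresenham_line_clipped x0 y0 x1 y1 sig_dim (bresenham_line_clipped x0 y0 x1 y1 sig_dim)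

-- ===== LEMMAS AND PROOFS =====

-- proof-only straight (non-accumulator) forms of the three loops
def aRun (sig_dim x1 y1 dx dy sx sy : Int) : Nat → Int → Int → Int → List (Int × Int)
  | 0, _, _, _ => []
  | fuel+1, x0, y0, err =>
    if x0 = x1 ∧ y0 = y1 then (if 0 ≤ y0 ∧ y0 < sig_dim then [(x0, y0)] else [])
    else
      (if 0 ≤ y0 ∧ y0 < sig_dim then [(x0, y0)] else []) ++
      (if 2 * err ≥ dy then
         (if 2 * err ≤ dx then aRun sig_dim x1 y1 dx dy sx sy fuel (x0 + sx) (y0 + sy) (err + dy + dx)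
          else aRun sig_dim x1 y1 dx dy sx sy fuel (x0 + sx) y0 (err + dy))
       else
         (if 2 * err ≤ dx then aRun sig_dim x1 y1 dx dy sx sy fuel x0 (y0 + sy) (err + dx)
          else aRun sig_dim x1 y1 dx dy sx sy fuel x0 y0 err))

def bRunX (sig_dim sx sy adx ady : Int) : Nat → Int → Int → Int → List (Int × Int)
  | 0, _, _, _ => []
  | n+1, x, y, e =>
    (if 0 ≤ y ∧ y < sig_dim then [(x, y)] else []) ++
    (if e ≥ 0 then bRunX sig_dim sx sy adx ady n (x + sx) (y + sy) (e - 2 * adx + 2 * ady)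
     else bRunX sig_dim sx sy adx ady n (x + sx) y (e + 2 * ady))

def bRunY (sig_dim sx sy adx ady : Int) : Nat → Int → Int → Int → List (Int × Int)
  | 0, _, _, _ => []
  | n+1, x, y, e =>
    (if 0 ≤ y ∧ y < sig_dim then [(x, y)] else []) ++
    (if e ≥ 0 then bRunY sig_dim sx sy adx ady n (x + sx) (y + sy) (e - 2 * ady + 2 * adx)
     else bRunY sig_dim sx sy adx ady n x (y + sy) (e + 2 * adx))

-- the accumulator loops compute acc.reverse ++ the straight forms
theorem aLoop_eq_aRun (sig_dim x1 y1 dx dy sx sy : Int) :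
    ∀ (fuel : Nat) (x0 y0 err : Int) (acc : List (Int × Int)),
      aLoop sig_dim x1 y1 dx dy sx sy fuel x0 y0 err acc
        = acc.reverse ++ aRun sig_dim x1 y1 dx dy sx sy fuel x0 y0 err := by
  intro fuel
  induction fuel with
  | zero => intro x0 y0 err acc; simp [aLoop, aRun]
  | succ fuel IH =>
    intro x0 y0 err acc
    simp only [aLoop, aRun]
    split_ifs <;> simp [IH]
  
theorem bLoopX_eq_bRunX (sig_dim sx sy adx ady : Int) :
    ∀ (n : Nat) (x y e : Int) (acc : List (Int × Int)),
      bLoopX sig_dim sx sy adx ady n x y e acc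
        = acc.reverse ++ bRunX sig_dim sx sy adx ady n x y e := by
  intro n
  induction n with
  | zero => intro x y e acc; simp [bLoopX, bRunX]
  | succ n IH =>
    intro x y e acc
    simp only [bLoopX, bRunX]
    split_ifs <;> simp [IH]

theorem bLoopY_eq_bRunY (sig_dim sx sy adx ady : Int) :
    ∀ (n : Nat) (x y e : Int) (acc : List (Int × Int)),
      bLoopY sig_dim sx sy adx ady n x y e acc
        = acc.reverse ++ bRunY sig_dim sx sy adx ady n x y e := by
  intro n
  induction n with
  | zero => intro x y e acc; simp [bLoopY, bRunY]
  | succ n IH =>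
    intro x y e acc
    simp only [bLoopY, bRunY]
    split_ifs <;> simp [IH]


-- one-step unfolding equations (used to control rewriting in the inductions)
theorem aRun_succ (sig_dim x1 y1 dx dy sx sy : Int) (fuel : Nat) (x0 y0 err : Int) :
    aRun sig_dim x1 y1 dx dy sx sy (fuel + 1) x0 y0 err =
      if x0 = x1 ∧ y0 = y1 then (if 0 ≤ y0 ∧ y0 < sig_dim then [(x0, y0)] else [])
      else
        (if 0 ≤ y0 ∧ y0 < sig_dim then [(x0, y0)] else []) ++
        (if 2 * err ≥ dy then
           (if 2 * err ≤ dx then aRun sig_dim x1 y1 dx dy sx sy fuel (x0 + sx) (y0 + sy) (err + dy + dx)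
            else aRun sig_dim x1 y1 dx dy sx sy fuel (x0 + sx) y0 (err + dy))
         else
           (if 2 * err ≤ dx then aRun sig_dim x1 y1 dx dy sx sy fuel x0 (y0 + sy) (err + dx)
            else aRun sig_dim x1 y1 dx dy sx sy fuel x0 y0 err)) := rfl

theorem bRunX_succ (sig_dim sx sy adx ady : Int) (n : Nat) (x y e : Int) :
    bRunX sig_dim sx sy adx ady (n + 1) x y e =
      (if 0 ≤ y ∧ y < sig_dim then [(x, y)] else []) ++
      (if e ≥ 0 then bRunX sig_dim sx sy adx ady n (x + sx) (y + sy) (e - 2 * adx + 2 * ady)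
       else bRunX sig_dim sx sy adx ady n (x + sx) y (e + 2 * ady)) := rfl

theorem bRunY_succ (sig_dim sx sy adx ady : Int) (n : Nat) (x y e : Int) :
    bRunY sig_dim sx sy adx ady (n + 1) x y e =
      (if 0 ≤ y ∧ y < sig_dim then [(x, y)] else []) ++
      (if e ≥ 0 then bRunY sig_dim sx sy adx ady n (x + sx) (y + sy) (e - 2 * ady + 2 * adx)
       else bRunY sig_dim sx sy adx ady n x (y + sy) (e + 2 * adx)) := rfl

-- x-major correspondence: n x-steps and m y-steps remain, B's error e equals adx - 2*err.
theorem aRun_eq_bRunX (sig_dim sx sy adx ady x1 y1 : Int)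
    (hady : 0 ≤ ady) (hle : ady ≤ adx) (hadx : 1 ≤ adx)
    (hsx : sx = 1 ∨ sx = -1) :
    ∀ (n c : Nat) (x y err m : Int),
      x1 = x + sx * n → y1 = y + sy * m → 0 ≤ m →
      adx - 2 * err = 2 * (adx - n + 1) * ady - (2 * (ady - m) + 1) * adx →
      2 * ady - 2 * adx ≤ adx - 2 * err → adx - 2 * err ≤ 2 * ady - 1 →
      aRun sig_dim x1 y1 adx (-ady) sx sy (n + 1 + c) x y err
        = bRunX sig_dim sx sy adx ady (n + 1) x y (adx - 2 * err) := by
  intro n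
  induction n with
  | zero =>
    intro c x y err m hx hy hm heq hlb hub
    push_cast at heq hx
    have h2 : adx - 2 * err = 2 * ady + 2 * (m * adx) - adx := by linear_combination heq
    have hm0 : m = 0 := by
      by_contra hne
      have hmm : 0 ≤ (m - 1) * adx := mul_nonneg (by omega) (by omega)
      nlinarith
    have hxx : x = x1 := by omega
    have hyy : y = y1 := by rw [hy, hm0]; ring
    have hf : 0 + 1 + c = c + 1 := by omega
    rw [hf]
    simp only [aRun, bRunX]
    rw [if_pos ⟨hxx, hyy⟩]
    split_ifs <;> simp
  | succ n IH =>
    intro c x y err m hx hy hm heq hlb hub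
    push_cast at heq hx
    have hxne : ¬ (x = x1 ∧ y = y1) := by
      rcases hsx with h | h <;> rw [h] at hx <;> intro hc <;> omega
    have hf : (n + 1) + 1 + c = (n + 1 + c) + 1 := by omega
    rw [hf, aRun_succ, bRunX_succ, if_neg hxne]
    have hxcond : 2 * err ≥ -ady := by omega
    rw [if_pos hxcond]
    have hx' : x1 = (x + sx) + sx * (n : Int) := by rw [hx]; ring
    by_cases he : 0 ≤ adx - 2 * err
    · have hyA : 2 * err ≤ adx := by omega
      rw [if_pos hyA, if_pos (by omega : adx - 2 * err ≥ 0)]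
      have hnn : 0 ≤ (n : Int) * ady := mul_nonneg (by positivity) hady
      have hm1 : 1 ≤ m := by
        by_contra hne
        have hm0 : m = 0 := by omega
        rw [hm0] at heq
        nlinarith
      have hrec := IH c (x + sx) (y + sy) (err + -ady + adx) (m - 1)
        hx' (by rw [hy]; ring) (by omega)
        (by linear_combination heq) (by omega) (by omega)
      have harg : adx - 2 * err - 2 * adx + 2 * ady = adx - 2 * (err + -ady + adx) := by ring
      rw [harg, hrec]
    · have hyA : ¬ (2 * err ≤ adx) := by omega
      rw [if_neg hyA, if_neg (by omega : ¬ adx - 2 * err ≥ 0)]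
      have hrec := IH c (x + sx) y (err + -ady) m
        hx' hy hm
        (by linear_combination heq) (by omega) (by omega)
      have harg : adx - 2 * err + 2 * ady = adx - 2 * (err + -ady) := by ring
      rw [harg, hrec]

-- y-major correspondence: n y-steps and m x-steps remain, B's error e equals 2*err + ady.
theorem aRun_eq_bRunY (sig_dim sx sy adx ady x1 y1 : Int)
    (hadx : 0 ≤ adx) (hlt : adx < ady)
    (hsy : sy = 1 ∨ sy = -1) :
    ∀ (n c : Nat) (x y err m : Int),
      y1 = y + sy * n → x1 = x + sx * m → 0 ≤ m →
      2 * err + ady = 2 * (ady - n + 1) * adx - (2 * (adx - m) + 1) * ady →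
      2 * adx - 2 * ady ≤ 2 * err + ady → 2 * err + ady ≤ 2 * adx - 1 →
      aRun sig_dim x1 y1 adx (-ady) sx sy (n + 1 + c) x y err
        = bRunY sig_dim sx sy adx ady (n + 1) x y (2 * err + ady) := by
  intro n
  induction n with
  | zero =>
    intro c x y err m hy hx hm heq hlb hub
    push_cast at heq hy
    have h2 : 2 * err + ady = 2 * adx + 2 * (m * ady) - ady := by linear_combination heq
    have hm0 : m = 0 := by
      by_contra hne
      have hmm : 0 ≤ (m - 1) * ady := mul_nonneg (by omega) (by omega)
      nlinarith
    have hyy : y = y1 := by omega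
    have hxx : x = x1 := by rw [hx, hm0]; ring
    have hf : 0 + 1 + c = c + 1 := by omega
    rw [hf]
    simp only [aRun, bRunY]
    rw [if_pos ⟨hxx, hyy⟩]
    split_ifs <;> simp
  | succ n IH =>
    intro c x y err m hy hx hm heq hlb hub
    push_cast at heq hy
    have hxne : ¬ (x = x1 ∧ y = y1) := by
      rcases hsy with h | h <;> rw [h] at hy <;> intro hc <;> omega
    have hf : (n + 1) + 1 + c = (n + 1 + c) + 1 := by omega
    rw [hf, aRun_succ, bRunY_succ, if_neg hxne]
    have hycond : 2 * err ≤ adx := by omega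
    have hy' : y1 = (y + sy) + sy * (n : Int) := by rw [hy]; ring
    by_cases he : 0 ≤ 2 * err + ady
    · have hxA : 2 * err ≥ -ady := by omega
      rw [if_pos hxA, if_pos hycond, if_pos (by omega : 2 * err + ady ≥ 0)]
      have hnn : 0 ≤ (n : Int) * adx := mul_nonneg (by positivity) hadx
      have hm1 : 1 ≤ m := by
        by_contra hne
        have hm0 : m = 0 := by omega
        rw [hm0] at heq
        nlinarith
      have hrec := IH c (x + sx) (y + sy) (err + -ady + adx) (m - 1)
        hy' (by rw [hx]; ring) (by omega)
        (by linear_combination heq) (by omega) (by omega)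
      have harg : 2 * err + ady - 2 * ady + 2 * adx = 2 * (err + -ady + adx) + ady := by ring
      rw [harg, hrec]
    · have hxA : ¬ (2 * err ≥ -ady) := by omega
      rw [if_neg hxA, if_pos hycond, if_neg (by omega : ¬ 2 * err + ady ≥ 0)]
      have hrec := IH c x (y + sy) (err + adx) m
        hy' hx hm
        (by linear_combination heq) (by omega) (by omega)
      have harg : 2 * err + ady + 2 * adx = 2 * (err + adx) + ady := by ring
      rw [harg, hrec]

-- ===== VERDICT (by name: the statement is the Claim_ definition above) =====
theorem bresenham_line_clipped_spec : Claim_equal_bresenham_line_clipped := by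
  intro x0 y0 x1 y1 sig_dim _
  unfold Spec_bresenham_line_clipped bresenham_line_clipped bresenham_line_clipped_alt
  set adx := |x1 - x0| with hadx
  set ady := |y1 - y0| with hady
  have hadx0 : 0 ≤ adx := abs_nonneg _
  have hady0 : 0 ≤ ady := abs_nonneg _
  set sx : Int := if x0 < x1 then 1 else -1 with hsxdef
  set sy : Int := if y0 < y1 then 1 else -1 with hsydef
  have hsx : sx = 1 ∨ sx = -1 := by rw [hsxdef]; split_ifs <;> simp
  have hsy : sy = 1 ∨ sy = -1 := by rw [hsydef]; split_ifs <;> simp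
  have hxeq : x1 = x0 + sx * adx := by
    rw [hsxdef, hadx]; rcases lt_trichotomy x0 x1 with h | h | h
    · rw [if_pos h, abs_of_pos (by omega)]; ring
    · rw [abs_of_nonpos (by omega)]; split_ifs <;> omega
    · rw [if_neg (by omega), abs_of_neg (by omega)]; ring
  have hyeq : y1 = y0 + sy * ady := by
    rw [hsydef, hady]; rcases lt_trichotomy y0 y1 with h | h | h
    · rw [if_pos h, abs_of_pos (by omega)]; ring
    · rw [abs_of_nonpos (by omega)]; split_ifs <;> omega
    · rw [if_neg (by omega), abs_of_neg (by omega)]; ring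
  simp only
  rw [aLoop_eq_aRun, bLoopX_eq_bRunX, bLoopY_eq_bRunY]
  simp only [List.reverse_nil, List.nil_append]
  by_cases hmaj : adx ≥ ady
  · rw [if_pos hmaj]
    by_cases h0 : adx = 0
    · -- degenerate: adx = ady = 0, single point
      have hady' : ady = 0 := by omega
      have hx : x0 = x1 := by rw [hxeq, h0]; ring
      have hy : y0 = y1 := by rw [hyeq, hady']; ring
      have hf : (adx - -ady).toNat + 1 = 1 := by
        rw [h0, hady']; decide
      rw [hf]
      have hf2 : adx.toNat + 1 = 1 := by rw [h0]; decide
      rw [hf2]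
      simp only [aRun, bRunX]
      rw [if_pos ⟨hx, hy⟩]
      split_ifs <;> simp
    · have hadx1 : 1 ≤ adx := by omega
      have hfuel : (adx - -ady).toNat + 1 = adx.toNat + 1 + ady.toNat := by omega
      rw [hfuel]
      have hcast : ((adx.toNat : Int)) = adx := Int.toNat_of_nonneg hadx0
      have h := aRun_eq_bRunX sig_dim sx sy adx ady x1 y1 hady0 hmaj hadx1 hsx
        adx.toNat ady.toNat x0 y0 (adx + -ady) ady
        (by rw [hcast]; exact hxeq) hyeq hady0
        (by rw [hcast]; ring) (by omega) (by omega)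
      rw [h]
      congr 1
      omega
  · rw [if_neg hmaj]
    have hlt : adx < ady := by omega
    have hfuel : (adx - -ady).toNat + 1 = ady.toNat + 1 + adx.toNat := by omega
    rw [hfuel]
    have hcast : ((ady.toNat : Int)) = ady := Int.toNat_of_nonneg hady0
    have h := aRun_eq_bRunY sig_dim sx sy adx ady x1 y1 hadx0 hlt hsy
      ady.toNat adx.toNat x0 y0 (adx + -ady) adx
      (by rw [hcast]; exact hyeq) hxeq hadx0
      (by rw [hcast]; ring) (by omega) (by omega)
    rw [h]
    congr 1
    omega
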